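-- pv_equiv track=rewrite | github.com/kaikovacik/School | seng265/assn2/kwic2.py | preFormat
-- ===== SOURCE A (Python) =====
-- def preFormat(phrases, key_words):
-- 	output = []
--
-- 	for key_word in key_words:
-- 		for phrase in phrases:
-- 			phrase = phrase.split()
-- 			if key_word in [s.lower() for s in phrase]:
-- 				line = []
-- 				line.append(key_word) # first value of line saves current key
-- 				for word in phrase:
-- 					if word.lower() == key_word:
-- 						line.append(word.upper())
-- 					else:
-- 						line.append(word)
-- 				output.append(line)
--
-- 	return output
-- ===== SOURCE B (Python) =====
-- def preFormat(phrases, key_words):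
--     # Inverted index: lowercase word -> split phrases containing it, in phrase order (one pass; no per-key rescan).
--     index = {}
--     for phrase in phrases:
--         words = phrase.split()
--         for lw in dict.fromkeys(w.lower() for w in words):
--             index.setdefault(lw, []).append(words)
--     return [[kw] + [w.upper() if w.lower() == kw else w for w in words]
--             for kw in key_words
--             for words in index.get(kw, [])]
-- ===== Notes on version B (the rewrite author's own statement) =====
-- stated objective: alternative
-- what changed: B builds an inverted index (lowercase word -> ordered list of split phrases) in one pass over the phrases, then emits lines by direct lookup per key word, instead of A's re-splitting and re-scanning every phrase for every key word; it avoids rescans of non-matching phrases, though on match-dense inputs the output size dominates and a timing run measured no >=1.5x gain.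
import Mathlib
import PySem

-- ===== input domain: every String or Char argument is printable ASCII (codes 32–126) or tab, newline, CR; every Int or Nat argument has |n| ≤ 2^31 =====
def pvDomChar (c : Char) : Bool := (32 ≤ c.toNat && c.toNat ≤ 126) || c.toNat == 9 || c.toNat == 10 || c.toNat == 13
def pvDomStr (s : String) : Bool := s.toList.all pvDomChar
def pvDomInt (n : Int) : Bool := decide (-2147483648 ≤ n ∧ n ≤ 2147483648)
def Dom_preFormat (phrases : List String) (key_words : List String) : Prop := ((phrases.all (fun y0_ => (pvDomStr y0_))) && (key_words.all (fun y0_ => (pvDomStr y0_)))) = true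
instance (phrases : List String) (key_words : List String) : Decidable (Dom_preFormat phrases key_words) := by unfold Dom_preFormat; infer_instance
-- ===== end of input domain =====

-- B replaces A's per-key rescan of all phrases by a one-pass inverted index looked up per key word (alternative algorithm; return value proved equal).

-- ===== PORT A =====
def preFormat (phrases : List String) (key_words : List String) : List (List String) :=
  key_words.foldl (fun output key_word =>
    phrases.foldl (fun output phrase0 =>
      let phrase := PySem.Str.split₀ phrase0
      if (phrase.map PySem.Str.lower).contains key_word then
        let line := phrase.foldl (fun line word =>
          line ++ [if PySem.Str.lower word == key_word then PySem.Str.upper word else word]) [key_word]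
        output ++ [line]
      else output) output) []

-- ===== PORT B =====
def pvBuildIndex (phrases : List String) : PySem.Dict String (List (List String)) :=
  phrases.foldl (fun index phrase =>
    let words := PySem.Str.split₀ phrase
    (PySem.List.dedup (words.map PySem.Str.lower)).foldl
      (fun index lw => index.insert lw (index.getD lw [] ++ [words])) index)
    PySem.Dict.empty

def preFormat_alt (phrases : List String) (key_words : List String) : List (List String) :=
  let index := pvBuildIndex phrases
  key_words.flatMap (fun kw =>
    (index.getD kw []).map (fun words =>
      kw :: words.map (fun w => if PySem.Str.lower w == kw then PySem.Str.upper w else w)))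

-- ===== PRECONDITION & SPEC =====
def Spec_preFormat (phrases : List String) (key_words : List String) (out : List (List String)) : Prop := out = preFormat_alt phrases key_words
instance (phrases : List String) (key_words : List String) (out : List (List String)) : Decidable (Spec_preFormat phrases key_words out) := by unfold Spec_preFormat; infer_instance

-- ===== CLAIM (what is proved, stated in full; the proofs are below) =====
def Claim_equal_preFormat : Prop := ∀ (phrases : List String) (key_words : List String), Dom_preFormat phrases key_words → Spec_preFormat phrases key_words (preFormat phrases key_words)

-- ===== LEMMAS AND PROOFS =====

-- inner index-building loop over a duplicate-free key list: appends ws to exactly the matching bucket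
theorem pv_inner_getD (L : List String) (hL : L.Nodup) (ws : List String) (kw : String)
    (d : PySem.Dict String (List (List String))) :
    (L.foldl (fun index lw => index.insert lw (index.getD lw [] ++ [ws])) d).getD kw []
      = d.getD kw [] ++ (if L.contains kw then [ws] else []) := by
  induction L generalizing d with
  | nil => simp
  | cons lw rest ih =>
    simp only [List.foldl_cons]
    rw [ih (List.nodup_cons.mp hL).2]
    by_cases h : kw = lw
    · subst h
      have hnm : kw ∉ rest := (List.nodup_cons.mp hL).1
      simp [hnm]
    · simp [PySem.Dict.getD_insert, h]

-- bucket of a key word = the split phrases containing it, in phrase order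
theorem pv_index_getD (phrases : List String) (kw : String)
    (d : PySem.Dict String (List (List String))) :
    (phrases.foldl (fun index phrase =>
      let words := PySem.Str.split₀ phrase
      (PySem.List.dedup (words.map PySem.Str.lower)).foldl
        (fun index lw => index.insert lw (index.getD lw [] ++ [words])) index) d).getD kw []
      = d.getD kw []
        ++ ((phrases.map PySem.Str.split₀).filter
              (fun ws => (ws.map PySem.Str.lower).contains kw))
  := by
  induction phrases generalizing d with
  | nil => simp
  | cons p rest ih =>
    simp only [List.foldl_cons, List.map_cons, List.filter_cons]
    rw [ih]
    rw [pv_inner_getD _ (PySem.List.nodup_dedup _) _ kw d]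
    simp only [PySem.List.dedup_eq_ofList]
    simp [PySem.Set.mem_ofList, List.append_assoc]
    split_ifs <;> simp

-- A's inner loop over the phrases, for one key word, in B's filter/map shape
theorem pv_akey (phrases : List String) (kw : String) (out : List (List String)) :
    phrases.foldl (fun output phrase0 =>
      let phrase := PySem.Str.split₀ phrase0
      if (phrase.map PySem.Str.lower).contains kw then
        let line := phrase.foldl (fun line word =>
          line ++ [if PySem.Str.lower word == kw then PySem.Str.upper word else word]) [kw]
        output ++ [line]
      else output) out
    = out ++ ((phrases.map PySem.Str.split₀).filter
        (fun ws => (ws.map PySem.Str.lower).contains kw)).map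
        (fun ws => kw :: ws.map (fun w => if PySem.Str.lower w == kw then PySem.Str.upper w else w)) := by
  induction phrases generalizing out with
  | nil => simp
  | cons p rest ih =>
    simp only [List.foldl_cons, List.map_cons, List.filter_cons]
    rw [ih, PySem.List.foldl_append_singleton_eq_map]
    simp only [List.singleton_append]
    split_ifs <;> simp

-- A's outer loop over the key words is a flatMap of the per-key contributions
theorem pv_outer (phrases : List String) (key_words : List String) (acc : List (List String)) :
    key_words.foldl (fun output key_word =>
      phrases.foldl (fun output phrase0 =>
        let phrase := PySem.Str.split₀ phrase0
        if (phrase.map PySem.Str.lower).contains key_word then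
          let line := phrase.foldl (fun line word =>
            line ++ [if PySem.Str.lower word == key_word then PySem.Str.upper word else word]) [key_word]
          output ++ [line]
        else output) output) acc
    = acc ++ key_words.flatMap (fun kw =>
        ((phrases.map PySem.Str.split₀).filter
          (fun ws => (ws.map PySem.Str.lower).contains kw)).map
          (fun ws => kw :: ws.map (fun w => if PySem.Str.lower w == kw then PySem.Str.upper w else w))) := by
  induction key_words generalizing acc with
  | nil => simp
  | cons kw rest ih =>
    simp only [List.foldl_cons, List.flatMap_cons]
    rw [pv_akey, ih, List.append_assoc]

-- ===== VERDICT (by name: the statement is the Claim_ definition above) =====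
theorem preFormat_spec : Claim_equal_preFormat := by
  intro phrases key_words _
  unfold Spec_preFormat preFormat preFormat_alt pvBuildIndex
  rw [pv_outer]
  simp only [List.nil_append]
  congr 1
  funext kw
  rw [pv_index_getD phrases kw PySem.Dict.empty]
  simp
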